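-- pv_equiv track=rewrite | github.com/nthmost/rb3_keytar | rb3keytar.py | parse_keys
-- ===== SOURCE A (Python) =====
-- def parse_keys(data):
--     """Given 27-byte array from keytar, return a set of pressed key indices (0..24)."""
--     pressed = set()
--     # Byte 5 => keys [0..7]
--     b = data[5]
--     for i in range(8):
--         if b & (1 << (7 - i)):
--             pressed.add(i)
--     # Byte 6 => [8..15]
--     b = data[6]
--     for i in range(8):
--         if b & (1 << (7 - i)):
--             pressed.add(8 + i)
--     # Byte 7 => [16..23]
--     b = data[7]
--     for i in range(8):
--         if b & (1 << (7 - i)):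
--             pressed.add(16 + i)
--     # Byte 8 => top bit = key 24
--     b = data[8]
--     if b & 0x80:
--         pressed.add(24)
--     return pressed
-- ===== SOURCE B (Python) =====
-- def parse_keys(data):
--     """Given 27-byte array from keytar, return a set of pressed key indices (0..24)."""
--     # Pack the four relevant bytes into one 25-bit word: key k lives at bit 24-k.
--     word = ((data[5] & 0xFF) << 17) | ((data[6] & 0xFF) << 9) | ((data[7] & 0xFF) << 1) | ((data[8] & 0x80) >> 7)
--     pressed = set()
--     # Peel off the highest set bit until none remain; only pressed keys are visited.
--     while word:
--         p = word.bit_length() - 1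
--         pressed.add(24 - p)
--         word ^= 1 << p
--     return pressed
-- ===== Notes on version B (the rewrite author's own statement) =====
-- stated objective: alternative
-- what changed: Instead of three unrolled per-byte bit-test loops plus a byte-8 special case, B packs the four relevant bytes into one 25-bit integer and extracts the pressed keys by repeatedly peeling the highest set bit with bit_length, so the loop visits only the set bits rather than testing all 25 positions.
import Mathlib
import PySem

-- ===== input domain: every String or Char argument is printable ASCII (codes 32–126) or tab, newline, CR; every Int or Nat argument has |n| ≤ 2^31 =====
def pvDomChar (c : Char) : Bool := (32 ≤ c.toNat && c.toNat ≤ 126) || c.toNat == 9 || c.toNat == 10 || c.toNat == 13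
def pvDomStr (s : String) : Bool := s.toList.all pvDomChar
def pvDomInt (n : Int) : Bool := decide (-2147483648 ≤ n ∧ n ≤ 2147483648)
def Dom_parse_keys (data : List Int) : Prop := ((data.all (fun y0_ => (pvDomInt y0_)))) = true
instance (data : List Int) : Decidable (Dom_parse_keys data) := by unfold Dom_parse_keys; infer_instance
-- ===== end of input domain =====

-- B packs the four relevant bytes into one 25-bit word and extracts pressed keys by
-- repeatedly peeling the highest set bit via bit_length, visiting only set bits
-- instead of testing all 25 bit positions in per-byte loops (objective: alternative).

-- ===== PORT A =====
def parse_keys (data : List Int) : List Int :=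
  -- data[5..8]; 'none' = IndexError, excluded by Pre_parse_keys
  match PySem.List.pyGet? data 5, PySem.List.pyGet? data 6,
        PySem.List.pyGet? data 7, PySem.List.pyGet? data 8 with
  | some b5, some b6, some b7, some b8 =>
    let p1 : PySem.Set Int :=
      (PySem.List.pyRange 0 8 1).foldl (fun acc i =>
        if PySem.Int.band b5 ((1:Int) <<< Int.ofNat (7 - i).toNat) ≠ 0 then PySem.Set.add acc i else acc)
        PySem.Set.empty
    let p2 : PySem.Set Int :=
      (PySem.List.pyRange 0 8 1).foldl (fun acc i =>
        if PySem.Int.band b6 ((1:Int) <<< Int.ofNat (7 - i).toNat) ≠ 0 then PySem.Set.add acc (8 + i) else acc)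
        p1
    let p3 : PySem.Set Int :=
      (PySem.List.pyRange 0 8 1).foldl (fun acc i =>
        if PySem.Int.band b7 ((1:Int) <<< Int.ofNat (7 - i).toNat) ≠ 0 then PySem.Set.add acc (16 + i) else acc)
        p2
    if PySem.Int.band b8 128 ≠ 0 then PySem.Set.add p3 24 else p3
  | _, _, _, _ => []

-- ===== PORT B =====
-- while word: p = word.bit_length() - 1; pressed.add(24 - p); word ^= 1 << p
-- The word is a nonnegative Python int < 2^25, tracked as a Nat (exact); fuel 25 only
-- makes the recursion total — each pass clears the top set bit of a 25-bit word.
def pvPeel (fuel : Nat) (word : Nat) (pressed : PySem.Set Int) : PySem.Set Int :=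
  match fuel with
  | 0 => pressed
  | f + 1 =>
    if word = 0 then pressed
    else
      let p := PySem.Int.bitLength (word : Int) - 1
      pvPeel f (word ^^^ (1 <<< p)) (PySem.Set.add pressed (24 - (p : Int)))

def parse_keys_alt (data : List Int) : List Int :=
  -- data[5..8]; 'none' = IndexError, excluded by Pre_parse_keys
  match PySem.List.pyGet? data 5 with
  | none => []
  | some b5 =>
  match PySem.List.pyGet? data 6 with
  | none => []
  | some b6 =>
  match PySem.List.pyGet? data 7 with
  | none => []
  | some b7 =>
  match PySem.List.pyGet? data 8 with
  | none => []
  | some b8 =>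
    -- word = ((data[5]&0xFF)<<17)|((data[6]&0xFF)<<9)|((data[7]&0xFF)<<1)|((data[8]&0x80)>>7)
    -- each masked byte is a nonnegative int, so the packed word is computed over Nat (exact)
    let word : Nat := ((PySem.Int.band b5 255).toNat <<< 17) ||| ((PySem.Int.band b6 255).toNat <<< 9)
                  ||| ((PySem.Int.band b7 255).toNat <<< 1) ||| ((PySem.Int.band b8 128).toNat >>> 7)
    pvPeel 25 word PySem.Set.empty

-- ===== PRECONDITION & SPEC =====
-- A raises IndexError (it reads data[5..8]) iff the buffer has fewer than 9 bytes; Pre_ excludes exactly those.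
def Pre_parse_keys (data : List Int) : Prop := 9 ≤ data.length
instance (data : List Int) : Decidable (Pre_parse_keys data) := by unfold Pre_parse_keys; infer_instance
def pvWitness_parse_keys : List Int := [0, 0, 0, 0, 0, 255, 1, 2, 128]
def Spec_parse_keys (data : List Int) (out : List Int) : Prop := out = parse_keys_alt data
instance (data : List Int) (out : List Int) : Decidable (Spec_parse_keys data out) := by unfold Spec_parse_keys; infer_instance

-- ===== CLAIM (what is proved, stated in full; the proofs are below) =====
def Claim_equal_parse_keys : Prop := ∀ (data : List Int), Dom_parse_keys data → Pre_parse_keys data → Spec_parse_keys data (parse_keys data)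

-- ===== LEMMAS AND PROOFS =====

-- ---- A-side: each unrolled loop appends the filtered, offset-mapped index list ----
lemma foldl_addIf (c : Int → Prop) [DecidablePred c] (f : Int → Int) :
    ∀ (xs s : List Int), (∀ x ∈ xs, f x ∉ s) → (xs.map f).Nodup →
      List.foldl (fun acc x => if c x then PySem.Set.add acc (f x) else acc) s xs
        = s ++ (xs.filter fun x => decide (c x)).map f := by
  intro xs
  induction xs with
  | nil => intro s _ _; simp
  | cons x xs ih =>
    intro s hdisj hnd
    simp only [List.map_cons, List.nodup_cons] at hnd
    simp only [List.foldl_cons, List.filter_cons]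
    by_cases hc : c x
    · rw [if_pos hc, PySem.Set.add_of_not_mem (hdisj x (by simp)),
        ih (s ++ [f x]) ?_ hnd.2]
      · simp [hc]
      · intro y hy
        simp only [List.mem_append, List.mem_singleton, not_or]
        exact ⟨hdisj y (List.mem_cons_of_mem _ hy), fun h => hnd.1 (h ▸ List.mem_map_of_mem hy)⟩
    · rw [if_neg hc, ih s (fun y hy => hdisj y (List.mem_cons_of_mem _ hy)) hnd.2]
      simp [hc]

lemma addIf_off (b off : Int) (s : List Int)
    (hs : ∀ y ∈ s, y < off) :
    List.foldl (fun acc i =>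
        if PySem.Int.band b ((1:Int) <<< Int.ofNat (7 - i).toNat) ≠ 0 then PySem.Set.add acc (off + i) else acc)
      s (PySem.List.pyRange 0 8)
      = s ++ ((PySem.List.pyRange 0 8).filter fun x =>
          decide (PySem.Int.band b ((1:Int) <<< Int.ofNat (7 - x).toNat) ≠ 0)).map (fun i => off + i) := by
  rw [foldl_addIf (fun i => PySem.Int.band b ((1:Int) <<< Int.ofNat (7 - i).toNat) ≠ 0) (fun i => off + i)]
  · intro x hx
    have hx8 : 0 ≤ x ∧ x < 8 := by
      have : ∀ y ∈ (PySem.List.pyRange 0 8 : List Int), 0 ≤ y ∧ y < 8 := by decide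
      exact this x hx
    intro hmem
    have := hs _ hmem
    omega
  · refine List.Nodup.map (fun u v h => by omega) ?_
    decide

-- ---- bit-level facts about the masked bytes ----
lemma one_shl_int (j : Nat) : (1:Int) <<< Int.ofNat j = ((2^j : Nat) : Int) := by
  exact_mod_cast Int.one_shiftLeft j

lemma tb_small (w n j : Nat) (hw : w < 2^n) (hj : n ≤ j) : w.testBit j = false :=
  Nat.testBit_lt_two_pow (lt_of_lt_of_le hw (Nat.pow_le_pow_right (by norm_num) hj))

lemma band255_lt (b : Int) : (PySem.Int.band b 255).toNat < 256 := by
  unfold PySem.Int.band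
  have hand : b.toNat &&& (255:Int).toNat ≤ 255 := Nat.and_le_right
  by_cases hb : 0 ≤ b
  · rw [if_pos hb, if_pos (by norm_num), Int.toNat_natCast]
    omega
  · rw [if_neg hb, if_pos (by norm_num), Int.toNat_natCast]
    have : (255:Int).toNat = 255 := rfl
    omega

-- b & (1 << j) is nonzero exactly when bit j of the masked byte b & 255 is set (j ≤ 7)
set_option maxRecDepth 8192 in
lemma band_pow_iff (b : Int) (j : Nat) (hj : j ≤ 7) :
    (PySem.Int.band b ((1:Int) <<< Int.ofNat j) ≠ 0) ↔ (PySem.Int.band b 255).toNat.testBit j = true := by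
  have h255 : ∀ j ≤ 7, Nat.testBit 255 j = true := by decide
  have hcompl : ∀ r < 256, ∀ j ≤ 7, (255 - r).testBit j = !(Nat.testBit r j) := by decide
  have ht255 : (255:Int).toNat = 255 := rfl
  rw [one_shl_int]
  unfold PySem.Int.band
  by_cases hb : 0 ≤ b
  · rw [if_pos hb, if_pos (by positivity), if_pos hb, if_pos (by norm_num)]
    rw [Int.toNat_natCast, Int.toNat_natCast, ht255, ne_eq, Int.natCast_eq_zero]
    rw [Nat.and_two_pow, Nat.testBit_and, h255 j hj]
    cases hbit : b.toNat.testBit j <;> simp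
  · rw [if_neg hb, if_pos (by positivity), if_neg hb, if_pos (by norm_num)]
    set m := (-b - 1).toNat with hm
    rw [Int.toNat_natCast, Int.toNat_natCast, ht255, ne_eq, Int.natCast_eq_zero]
    have hmod : 255 &&& m = m % 256 := by
      rw [Nat.and_comm]
      exact Nat.and_two_pow_sub_one_eq_mod m 8
    rw [Nat.and_comm (2^j) m, Nat.and_two_pow, hmod,
      hcompl (m % 256) (Nat.mod_lt _ (by norm_num)) j hj]
    have hmb : (m % 256).testBit j = m.testBit j := by
      rw [show (256:Nat) = 2^8 from rfl, Nat.testBit_mod_two_pow]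
      simp [show j < 8 by omega]
    rw [hmb]
    have hpow : 0 < 2^j := Nat.two_pow_pos j
    cases hbit : m.testBit j <;> simp

lemma band128_cases (b : Int) : PySem.Int.band b 128 = 0 ∨ PySem.Int.band b 128 = 128 := by
  unfold PySem.Int.band
  by_cases hb : 0 ≤ b
  · rw [if_pos hb, if_pos (by norm_num)]
    rw [show (128:Int).toNat = 2^7 from rfl, Nat.and_two_pow]
    cases b.toNat.testBit 7 <;> simp
  · rw [if_neg hb, if_pos (by norm_num)]
    rw [show (128:Int).toNat = 2^7 from rfl, Nat.and_comm (2^7) _, Nat.and_two_pow]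
    cases ((-b - 1).toNat).testBit 7 <;> simp

-- ---- B-side: what the peel loop computes ----
-- the keys of a packed word, smallest first (bit 24-k holds key k)
def pvKeys (n : Nat) : List Int :=
  ((List.range 25).filter (fun k => n.testBit (24 - k))).map (fun (k : Nat) => (k : Int))

lemma filter_split_range' (P Q : Nat → Bool) (q : Nat)
    (h2 : P q = true) (h3 : ∀ k ≤ q, Q k = false)
    (h1 : ∀ k < q, P k = false) (h4 : ∀ k, q < k → k < 25 → P k = Q k) :
    ∀ (n s : Nat), s ≤ q → q < s + n → s + n ≤ 25 →
      (List.range' s n).filter P = q :: (List.range' s n).filter Q := by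
  intro n
  induction n with
  | zero => intro s hs hq _; omega
  | succ n ih =>
    intro s hs hq hb
    rw [List.range'_succ, List.filter_cons, List.filter_cons]
    by_cases hsq : s = q
    · subst hsq
      rw [if_pos h2, if_neg (by simp [h3 s le_rfl])]
      congr 1
      apply List.filter_congr
      intro k hk
      have := List.mem_range'_1.mp hk
      exact h4 k (by omega) (by omega)
    · rw [if_neg (by simp [h1 s (by omega)]), if_neg (by simp [h3 s (by omega)])]
      exact ih (s+1) (by omega) (by omega) (by omega)

lemma xor_top_lt (w p : Nat) (h1 : w.testBit p = true) (h2 : w < 2^(p+1)) :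
    w ^^^ (1 <<< p) < 2^p := by
  apply Nat.lt_of_testBit p
  · simp [Nat.one_shiftLeft, Nat.testBit_xor, h1]
  · simp [Nat.testBit_two_pow_self]
  · intro j hj
    have hw : w.testBit j = false := tb_small w (p+1) j h2 hj
    simp [Nat.one_shiftLeft, Nat.testBit_xor, Nat.testBit_two_pow, hw]

lemma xor_top_testBit (w p j : Nat) (hj : j ≠ p) :
    (w ^^^ (1 <<< p)).testBit j = w.testBit j := by
  simp [Nat.one_shiftLeft, Nat.testBit_xor, Ne.symm hj]

lemma peel_spec (fuel : Nat) : ∀ (word : Nat) (acc : List Int),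
    word < 2^fuel → fuel ≤ 25 →
    (∀ y ∈ acc, y < 25 - (PySem.Int.bitLength (word : Int) : Int)) →
    pvPeel fuel word acc = acc ++ pvKeys word := by
  induction fuel with
  | zero =>
    intro word acc hw _ _
    interval_cases word
    have : pvKeys 0 = [] := by decide
    simp [pvPeel, this]
  | succ f ih =>
    intro word acc hw hf hacc
    rw [pvPeel]
    by_cases h0 : word = 0
    · subst h0
      have : pvKeys 0 = [] := by decide
      simp [this]
    · rw [if_neg h0]
      have hna : ((word : Int)).natAbs = word := Int.natAbs_natCast word
      have hlt : word < 2 ^ PySem.Int.bitLength (word : Int) := by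
        have := PySem.Int.lt_two_pow_bitLength (word : Int); omega
      have hge : 2 ^ (PySem.Int.bitLength (word : Int) - 1) ≤ word := by
        have := PySem.Int.two_pow_bitLength_le (word : Int) (by exact_mod_cast h0)
        omega
      set bL := PySem.Int.bitLength (word : Int) with hbL
      have hbL1 : 1 ≤ bL := by
        by_contra h
        have : bL = 0 := by omega
        rw [this] at hlt; omega
      set p := bL - 1 with hp
      have hplt : word < 2^(p+1) := by
        have : p + 1 = bL := by omega
        rw [this]; exact hlt
      have hpf : p ≤ f := by
        by_contra h
        have : 2^(f+1) ≤ 2^p := Nat.pow_le_pow_right (by norm_num) (by omega)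
        omega
      have hp24 : p ≤ 24 := by omega
      have hbit : word.testBit p = true :=
        Nat.testBit_of_two_pow_le_and_two_pow_add_one_gt hge hplt
      set next := word ^^^ (1 <<< p) with hnext
      have hnlt : next < 2^p := xor_top_lt word p hbit hplt
      have hnbL : PySem.Int.bitLength (next : Int) ≤ p := by
        by_cases hz : next = 0
        · rw [hz, show ((0:Nat):Int) = (0:Int) from rfl, show PySem.Int.bitLength (0:Int) = 0 from by decide]
          omega
        · by_contra h
          have h' : p + 1 ≤ PySem.Int.bitLength (next : Int) := by omega
          have h2 := PySem.Int.two_pow_bitLength_le (next : Int) (by exact_mod_cast hz)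
          have hna2 : ((next : Int)).natAbs = next := Int.natAbs_natCast next
          have : 2^p ≤ 2 ^ (PySem.Int.bitLength (next : Int) - 1) :=
            Nat.pow_le_pow_right (by norm_num) (by omega)
          omega
      -- Set.add appends: the new key 24-p is larger than everything in acc
      have hkey : ∀ y ∈ acc, y < 24 - (p : Int) := by
        intro y hy
        have := hacc y hy
        omega
      show pvPeel f (word ^^^ (1 <<< p)) (PySem.Set.add acc (24 - (p:Int))) = acc ++ pvKeys word
      rw [PySem.Set.add_of_not_mem (by intro h; have := hkey _ h; omega)]
      rw [ih next (acc ++ [24 - (p:Int)])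
        (lt_of_lt_of_le hnlt (Nat.pow_le_pow_right (by norm_num) hpf)) (by omega) ?_]
      · -- pvKeys word = (24 - p) :: pvKeys next
        have hsplit : pvKeys word = ((24 - p : Nat) : Int) :: pvKeys next := by
          unfold pvKeys
          rw [List.range_eq_range',
            filter_split_range' (fun k => word.testBit (24 - k)) (fun k => next.testBit (24 - k))
              (24 - p)
              (by show word.testBit (24 - (24 - p)) = true
                  rw [show 24 - (24 - p) = p from by omega]; exact hbit)
              (by intro k hk
                  show next.testBit (24 - k) = false
                  exact tb_small next p (24 - k) hnlt (by omega))
              (by intro k hk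
                  show word.testBit (24 - k) = false
                  exact tb_small word (p+1) (24 - k) hplt (by omega))
              (by intro k hk hk25
                  show word.testBit (24 - k) = next.testBit (24 - k)
                  exact (xor_top_testBit word p (24 - k) (by omega)).symm)
              25 0 (by omega) (by omega) (by omega)]
          simp
        rw [hsplit]
        rw [show ((24 - p : Nat) : Int) = 24 - (p : Int) from by omega]
        simp
      · intro y hy
        rcases List.mem_append.mp hy with h | h
        · have := hacc y h; omega
        · simp only [List.mem_singleton] at h
          subst h
          omega

-- ---- bits of the packed word, by position ----
lemma word_testBit (w5 w6 w7 t : Nat) (h6 : w6 < 256) (h7 : w7 < 256) (ht : t < 2) (n : Nat) :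
    ((w5 <<< 17) ||| (w6 <<< 9) ||| (w7 <<< 1) ||| t).testBit n =
      if 17 ≤ n then w5.testBit (n-17)
      else if 9 ≤ n then w6.testBit (n-9)
      else if 1 ≤ n then w7.testBit (n-1)
      else t.testBit 0 := by
  simp only [Nat.testBit_or, Nat.testBit_shiftLeft]
  by_cases c1 : 17 ≤ n
  · have e6 : w6.testBit (n-9) = false := tb_small _ 8 _ h6 (by omega)
    have e7 : w7.testBit (n-1) = false := tb_small _ 8 _ h7 (by omega)
    have et : t.testBit n = false := tb_small _ 1 _ ht (by omega)
    simp [c1, show 9 ≤ n by omega, show 1 ≤ n by omega, e6, e7, et]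
  · by_cases c2 : 9 ≤ n
    · have e7 : w7.testBit (n-1) = false := tb_small _ 8 _ h7 (by omega)
      have et : t.testBit n = false := tb_small _ 1 _ ht (by omega)
      simp [c1, c2, show 1 ≤ n by omega, e7, et]
    · by_cases c3 : 1 ≤ n
      · have et : t.testBit n = false := tb_small _ 1 _ ht (by omega)
        simp [c1, c2, c3, et]
      · have hn : n = 0 := by omega
        subst hn
        simp

-- ---- the packed word splits into the four byte chunks ----
lemma pvKeys_split (w5 w6 w7 t : Nat) (h6 : w6 < 256) (h7 : w7 < 256) (ht : t < 2) :
    pvKeys ((w5 <<< 17) ||| (w6 <<< 9) ||| (w7 <<< 1) ||| t)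
      = ((List.range 8).filter (fun i => w5.testBit (7-i))).map (fun (k : Nat) => (k : Int))
        ++ ((List.range 8).filter (fun i => w6.testBit (7-i))).map (fun (k : Nat) => (8:Int) + k)
        ++ ((List.range 8).filter (fun i => w7.testBit (7-i))).map (fun (k : Nat) => (16:Int) + k)
        ++ (if t = 1 then [(24:Int)] else []) := by
  have hw := word_testBit w5 w6 w7 t h6 h7 ht
  have e1 : (List.range 8).filter (fun k => ((w5 <<< 17) ||| (w6 <<< 9) ||| (w7 <<< 1) ||| t).testBit (24 - k))
      = (List.range 8).filter (fun i => w5.testBit (7-i)) := by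
    apply List.filter_congr
    intro k hk
    have hk8 : k < 8 := List.mem_range.mp hk
    rw [hw (24 - k)]
    simp [show 17 ≤ 24 - k by omega, show 24 - k - 17 = 7 - k by omega]
  have e2 : (List.range 8).filter (fun k => ((w5 <<< 17) ||| (w6 <<< 9) ||| (w7 <<< 1) ||| t).testBit (24 - (8 + k)))
      = (List.range 8).filter (fun i => w6.testBit (7-i)) := by
    apply List.filter_congr
    intro k hk
    have hk8 : k < 8 := List.mem_range.mp hk
    rw [hw (24 - (8 + k))]
    simp [show ¬ (17 ≤ 24 - (8 + k)) by omega, show 9 ≤ 24 - (8 + k) by omega,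
      show 24 - (8 + k) - 9 = 7 - k by omega]
  have e3 : (List.range 8).filter (fun k => ((w5 <<< 17) ||| (w6 <<< 9) ||| (w7 <<< 1) ||| t).testBit (24 - (16 + k)))
      = (List.range 8).filter (fun i => w7.testBit (7-i)) := by
    apply List.filter_congr
    intro k hk
    have hk8 : k < 8 := List.mem_range.mp hk
    rw [hw (24 - (16 + k))]
    simp [show ¬ (17 ≤ 24 - (16 + k)) by omega, show ¬ (9 ≤ 24 - (16 + k)) by omega,
      show 1 ≤ 24 - (16 + k) by omega, show 24 - (16 + k) - 1 = 7 - k by omega]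
  have e4 : ((w5 <<< 17) ||| (w6 <<< 9) ||| (w7 <<< 1) ||| t).testBit (24 - 24) = decide (t = 1) := by
    rw [hw (24 - 24)]
    interval_cases t <;> simp
  unfold pvKeys
  rw [show List.range 25
      = List.range 8 ++ (List.range 8).map (8+·) ++ (List.range 8).map (16+·) ++ [24] from by decide]
  rw [List.filter_append, List.filter_append, List.filter_append,
    List.filter_map, List.filter_map, List.map_append, List.map_append, List.map_append,
    List.map_map, List.map_map]
  rw [show ((fun k => ((w5 <<< 17) ||| (w6 <<< 9) ||| (w7 <<< 1) ||| t).testBit (24 - k)) ∘ (8+·))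
      = fun k => ((w5 <<< 17) ||| (w6 <<< 9) ||| (w7 <<< 1) ||| t).testBit (24 - (8 + k)) from rfl,
    show ((fun k => ((w5 <<< 17) ||| (w6 <<< 9) ||| (w7 <<< 1) ||| t).testBit (24 - k)) ∘ (16+·))
      = fun k => ((w5 <<< 17) ||| (w6 <<< 9) ||| (w7 <<< 1) ||| t).testBit (24 - (16 + k)) from rfl]
  rw [e1, e2, e3]
  rw [List.filter_cons, List.filter_nil, e4]
  congr 1
  by_cases htt : t = 1 <;> simp [htt]

-- ---- A's per-byte filter over range(8), re-indexed over Nat with the masked byte ----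
lemma filtA (b : Int) :
    ((PySem.List.pyRange 0 8).filter (fun i => decide (PySem.Int.band b ((1:Int) <<< Int.ofNat ((7:Int) - i).toNat) ≠ 0)))
      = ((List.range 8).filter (fun i => (PySem.Int.band b 255).toNat.testBit (7-i))).map (fun (k : Nat) => (k : Int)) := by
  rw [show (PySem.List.pyRange 0 8 : List Int) = (List.range 8).map (fun (k : Nat) => (k : Int)) from by decide]
  rw [List.filter_map]
  congr 1
  apply List.filter_congr
  intro k hk
  have hk8 : k < 8 := List.mem_range.mp hk
  simp only [Function.comp_apply]
  have h7k : ((7:Int) - (k:Nat)).toNat = 7 - k := by omega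
  rw [h7k]
  have hiff := band_pow_iff b (7-k) (by omega)
  rcases Bool.eq_false_or_eq_true ((PySem.Int.band b 255).toNat.testBit (7-k)) with hbit | hbit <;>
    simp [hbit] at hiff ⊢ <;> simp [hiff]

-- ===== VERDICT =====
theorem parse_keys_spec : Claim_equal_parse_keys := by
  intro data _ hpre
  unfold Spec_parse_keys
  obtain ⟨a0,a1,a2,a3,a4,b5,b6,b7,b8,t,rfl⟩ :
      ∃ a0 a1 a2 a3 a4 b5 b6 b7 b8 t, data = a0::a1::a2::a3::a4::b5::b6::b7::b8::t := by
    unfold Pre_parse_keys at hpre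
    rcases data with _|⟨x0,_|⟨x1,_|⟨x2,_|⟨x3,_|⟨x4,_|⟨x5,_|⟨x6,_|⟨x7,_|⟨x8,t⟩⟩⟩⟩⟩⟩⟩⟩⟩
    all_goals try exact ⟨_,_,_,_,_,_,_,_,_,_,rfl⟩
    all_goals (exfalso; simp at hpre)
  have h5 : PySem.List.pyGet? (a0::a1::a2::a3::a4::b5::b6::b7::b8::t) 5 = some b5 := by
    rw [show (5:Int) = ((5:Nat):Int) from rfl, PySem.List.pyGet?_natCast]; rfl
  have h6 : PySem.List.pyGet? (a0::a1::a2::a3::a4::b5::b6::b7::b8::t) 6 = some b6 := by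
    rw [show (6:Int) = ((6:Nat):Int) from rfl, PySem.List.pyGet?_natCast]; rfl
  have h7 : PySem.List.pyGet? (a0::a1::a2::a3::a4::b5::b6::b7::b8::t) 7 = some b7 := by
    rw [show (7:Int) = ((7:Nat):Int) from rfl, PySem.List.pyGet?_natCast]; rfl
  have h8 : PySem.List.pyGet? (a0::a1::a2::a3::a4::b5::b6::b7::b8::t) 8 = some b8 := by
    rw [show (8:Int) = ((8:Nat):Int) from rfl, PySem.List.pyGet?_natCast]; rfl
  simp only [parse_keys, parse_keys_alt, h5, h6, h7, h8]
  have hR8 : ∀ y ∈ (PySem.List.pyRange 0 8 : List Int), 0 ≤ y ∧ y < 8 := by decide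
  -- ==== A's side: three loops then the byte-8 test ====
  rw [foldl_addIf (fun i => PySem.Int.band b5 ((1:Int) <<< Int.ofNat ((7:Int) - i).toNat) ≠ 0) (fun i => i)
      (PySem.List.pyRange 0 8) PySem.Set.empty (by intro x _; simp [PySem.Set.empty]) (by decide)]
  simp only [PySem.Set.empty, List.nil_append, List.map_id']
  rw [addIf_off b6 8
      (List.filter (fun x => decide (PySem.Int.band b5 ((1:Int) <<< Int.ofNat ((7:Int) - x).toNat) ≠ 0))
        (PySem.List.pyRange 0 8))
      (fun y hy => (hR8 y (List.mem_filter.mp hy).1).2.trans_le (by norm_num))]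
  rw [addIf_off b7 16 _ ?hs3]
  case hs3 =>
    intro y hy
    rcases List.mem_append.mp hy with h | h
    · exact (hR8 y (List.mem_filter.mp h).1).2.trans_le (by norm_num)
    · obtain ⟨x, hx, rfl⟩ := List.mem_map.mp h
      have := (hR8 x (List.mem_filter.mp hx).1).2
      omega
  rw [filtA b5, filtA b6, filtA b7]
  simp only [List.map_map]
  -- ==== B's side: the peel loop computes the keys of the packed word ====
  have hw5 := band255_lt b5
  have hw6 := band255_lt b6
  have hw7 := band255_lt b7
  set w5 := (PySem.Int.band b5 255).toNat
  set w6 := (PySem.Int.band b6 255).toNat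
  set w7 := (PySem.Int.band b7 255).toNat
  simp only [Function.comp_def]
  set c5 := ((List.range 8).filter (fun i => w5.testBit (7-i))).map (fun (k : Nat) => (k : Int)) with hc5
  set c6 := ((List.range 8).filter (fun i => w6.testBit (7-i))).map (fun (k : Nat) => (8:Int) + k) with hc6
  set c7 := ((List.range 8).filter (fun i => w7.testBit (7-i))).map (fun (k : Nat) => (16:Int) + k) with hc7
  have hs17 : w5 <<< 17 < 2^25 := by rw [Nat.shiftLeft_eq]; omega
  have hs9 : w6 <<< 9 < 2^25 := by rw [Nat.shiftLeft_eq]; omega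
  have hs1 : w7 <<< 1 < 2^25 := by rw [Nat.shiftLeft_eq]; omega
  rcases band128_cases b8 with h8c | h8c <;> rw [h8c]
  · -- byte 8 has its top bit clear: no key 24 on either side
    rw [if_neg (by norm_num)]
    rw [show ((0:Int).toNat >>> 7) = 0 from by decide]
    rw [peel_spec 25 _ [] (by
        refine Nat.or_lt_two_pow (Nat.or_lt_two_pow (Nat.or_lt_two_pow hs17 hs9) hs1) (by norm_num))
      (by omega) (by simp)]
    rw [pvKeys_split w5 w6 w7 0 hw6 hw7 (by norm_num)]
    simp [hc5, hc6, hc7]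
  · -- byte 8 has its top bit set: key 24 is appended by both
    rw [if_pos (by norm_num)]
    rw [show ((128:Int).toNat >>> 7) = 1 from by decide]
    rw [peel_spec 25 _ [] (by
        refine Nat.or_lt_two_pow (Nat.or_lt_two_pow (Nat.or_lt_two_pow hs17 hs9) hs1) (by norm_num))
      (by omega) (by simp)]
    rw [pvKeys_split w5 w6 w7 1 hw6 hw7 (by norm_num)]
    rw [PySem.Set.add_of_not_mem ?nm]
    · simp [hc5, hc6, hc7]
    case nm =>
      intro hmem
      simp only [hc5, hc6, hc7, List.mem_append, List.mem_map, List.mem_filter,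
        List.mem_range] at hmem
      rcases hmem with (⟨k, ⟨hk, _⟩, hkv⟩ | ⟨k, ⟨hk, _⟩, hkv⟩) | ⟨k, ⟨hk, _⟩, hkv⟩ <;> omega
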